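-- pv_equiv track=rewrite | github.com/tamagodaisukieggman/Maya | scripts/tkgTools/launchers/maya/tkgTools/python/TkgSkinBase.py | RemoveNamespace
-- ===== SOURCE A (Python) =====
-- def RemoveNamespace(name):
--
--     if name.find("|") == -1:
--         return RemoveNamespaceBase(name)
--
--     splitStrList = name.split("|")
--     resultName = ""
--     for p in range(0,len(splitStrList)):
--
--         fixName = RemoveNamespaceBase(splitStrList[p])
--
--         resultName += fixName
--
--         if p == len(splitStrList) - 1:
--             continue
--
--         resultName += "|"
--
--     return resultName
--
-- def RemoveNamespaceBase(name):
--
--     if name.find(":") == -1: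
--         return name
--
--     splitStr = name.split(":")
--
--     return splitStr[len(splitStr) - 1]
-- ===== SOURCE B (Python) =====
-- def RemoveNamespace(name):
--     # One left-to-right pass over the characters: no splitting, no per-segment
--     # helper. `cur` holds the current segment's kept characters; a ':' discards
--     # them (keep only what follows the last colon), a '|' flushes the segment.
--     res = []
--     cur = []
--     for ch in name:
--         if ch == ':':
--             cur = []
--         elif ch == '|':
--             res.extend(cur)
--             res.append('|')
--             cur = []
--         else:
--             cur.append(ch)
--     res.extend(cur)
--     return ''.join(res)
-- ===== Notes on version B (the rewrite author's own statement) =====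
-- stated objective: alternative
-- what changed: Replaces A's split-on-'|' plus per-segment split-on-':' helper and index-based join loop with a single left-to-right pass over the characters that keeps a current-segment buffer, clears it at ':' and flushes it at '|'.
import Mathlib
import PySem

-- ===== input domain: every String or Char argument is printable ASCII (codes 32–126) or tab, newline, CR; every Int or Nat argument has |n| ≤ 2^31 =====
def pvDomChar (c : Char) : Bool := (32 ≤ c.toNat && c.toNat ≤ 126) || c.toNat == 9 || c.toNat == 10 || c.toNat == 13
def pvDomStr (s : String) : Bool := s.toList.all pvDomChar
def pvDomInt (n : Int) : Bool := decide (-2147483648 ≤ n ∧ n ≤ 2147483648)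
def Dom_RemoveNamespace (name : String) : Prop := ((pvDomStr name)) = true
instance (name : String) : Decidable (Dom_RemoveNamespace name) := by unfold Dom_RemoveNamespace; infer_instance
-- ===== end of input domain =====

-- B replaces A's split/split/join passes with one character pass; same cost, proved equal for every string.

-- ===== PORT A =====
def RemoveNamespaceBase (name : String) : String :=
  if PySem.Str.find name ":" = -1 then name
  else
    -- name.split(":"): the separator ":" is nonempty, so split? is always `some`
    let splitStr := (PySem.Str.split? name ":").getD []
    PySem.List.pyGetD splitStr ((splitStr.length : Int) - 1) ""

def RemoveNamespace (name : String) : String :=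
  if PySem.Str.find name "|" = -1 then RemoveNamespaceBase name
  else
    -- name.split("|"): the separator "|" is nonempty, so split? is always `some`
    let splitStrList := (PySem.Str.split? name "|").getD []
    let resultName := (PySem.List.pyRange 0 (splitStrList.length : Int)).foldl
      (fun resultName p =>
        let fixName := RemoveNamespaceBase (PySem.List.pyGetD splitStrList p "")
        let resultName := resultName ++ fixName
        if p = (splitStrList.length : Int) - 1 then resultName
        else resultName ++ "|") ""
    resultName

-- ===== PORT B =====
def RemoveNamespace_alt (name : String) : String :=
  -- one pass: (res, cur); ':' clears cur, '|' flushes cur ++ "|" into res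
  let st := name.toList.foldl
    (fun (st : List Char × List Char) ch =>
      if ch = ':' then (st.1, [])
      else if ch = '|' then (st.1 ++ st.2 ++ ['|'], [])
      else (st.1, st.2 ++ [ch]))
    ([], [])
  -- ''.join(res) ++ trailing cur: res/cur are lists of single characters
  String.ofList (st.1 ++ st.2)

-- ===== PRECONDITION & SPEC =====
def Spec_RemoveNamespace (name : String) (out : String) : Prop := out = RemoveNamespace_alt name
instance (name : String) (out : String) : Decidable (Spec_RemoveNamespace name out) := by unfold Spec_RemoveNamespace; infer_instance

-- ===== CLAIM (what is proved, stated in full; the proofs are below) =====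
def Claim_equal_RemoveNamespace : Prop := ∀ (name : String), Dom_RemoveNamespace name → Spec_RemoveNamespace name (RemoveNamespace name)

-- ===== LEMMAS AND PROOFS =====

-- the value both programs compute per '|'-segment: everything after the last ':'
def specC (seg : List Char) : List Char := (seg.splitOnP (· == ':')).getLastD []

-- join segments with '|'
def joinPipe : List (List Char) → List Char
  | [] => []
  | [x] => x
  | x :: y :: r => x ++ ['|'] ++ joinPipe (y :: r)

-- B's one-pass loop as a structural recursion on the characters
def gB : List Char → List Char → List Char
  | [], cur => cur
  | c :: cs, cur =>
    if c = ':' then gB cs []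
    else if c = '|' then cur ++ ['|'] ++ gB cs []
    else gB cs (cur ++ [c])

lemma getLastD_irrel {α : Type} (l : List α) (d d' : α) (h : l ≠ []) :
    l.getLastD d = l.getLastD d' := by
  cases l with
  | nil => exact absurd rfl h
  | cons a t => rw [List.getLastD_cons, List.getLastD_cons]

lemma getLastD_append_of_ne_nil {α : Type} (l l' : List α) (h : l' ≠ []) :
    ∀ (d : α), (l ++ l').getLastD d = l'.getLastD d := by
  induction l with
  | nil => intro d; rfl
  | cons a t ih =>
    intro d
    rw [List.cons_append, List.getLastD_cons, ih a]
    exact getLastD_irrel l' a d h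

lemma getD_length_sub_one {α : Type} (l : List α) (d : α) (h : l ≠ []) :
    l.getD (l.length - 1) d = l.getLastD d := by
  induction l with
  | nil => exact absurd rfl h
  | cons a t ih =>
    cases t with
    | nil => rfl
    | cons b u =>
      rw [List.getLastD_cons]
      have := ih (by simp)
      rw [getLastD_irrel _ _ a (by simp)] at this
      rw [← this]
      rfl

lemma specC_no_colon (cur : List Char) (h : ':' ∉ cur) : specC cur = cur := by
  unfold specC
  rw [List.splitOnP_eq_single]
  · rfl
  · intro x hx hpx
    exact h ((beq_iff_eq.mp hpx) ▸ hx)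

lemma specC_append_colon (xs ys : List Char) : specC (xs ++ ':' :: ys) = specC ys := by
  unfold specC
  rw [List.splitOnP_append_cons _ _ _ _ (by simp)]
  exact getLastD_append_of_ne_nil _ _ (List.splitOnP_ne_nil _ _) _

-- Chars.splitOn with a single-character separator is List.splitOnP
lemma splitOn_go_singleton (d : Char) :
    ∀ (fuel : Nat) (l cur : List Char) (acc : List (List Char)), l.length ≤ fuel →
      PySem.Chars.splitOn.go [d] fuel l cur acc
        = acc.reverse ++ (l.splitOnP (· == d)).modifyHead (cur.reverse ++ ·) := by
  intro fuel
  induction fuel with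
  | zero =>
    intro l cur acc h
    have : l = [] := List.length_eq_zero_iff.mp (Nat.le_zero.mp h)
    subst this
    simp [PySem.Chars.splitOn.go, List.splitOnP_nil]
  | succ n ih =>
    intro l cur acc h
    cases l with
    | nil => simp [PySem.Chars.splitOn.go, List.splitOnP_nil]
    | cons c rest =>
      rw [PySem.Chars.splitOn.go]
      by_cases hc : c = d
      · subst hc
        have hpre : [c].isPrefixOf (c :: rest) = true := by simp [List.isPrefixOf]
        rw [if_pos hpre]
        simp only [List.length_cons] at h
        rw [ih _ _ _ (by simpa using Nat.le_of_succ_le_succ h)]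
        have hid : List.modifyHead (fun x : List Char => x)
              (List.splitOnP (fun x => x == c) rest)
            = List.splitOnP (fun x => x == c) rest := by
          rw [show (fun x : List Char => x) = id from rfl, List.modifyHead_id]; rfl
        simp [List.splitOnP_cons, hid]
      · have hpre : [d].isPrefixOf (c :: rest) = false := by
          simp [List.isPrefixOf, Ne.symm hc]
        rw [hpre]
        simp only [Bool.false_eq_true, if_false]
        rw [ih _ _ _ (by simpa using Nat.le_of_succ_le_succ h)]
        rw [List.splitOnP_cons]
        simp only [hc, beq_iff_eq, if_false, List.modifyHead_modifyHead]
        have : ((c :: cur).reverse ++ ·) = (cur.reverse ++ ·) ∘ (c :: ·) := by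
          funext t; simp
        rw [this]

lemma splitOn_singleton (s : List Char) (d : Char) :
    PySem.Chars.splitOn s [d] = s.splitOnP (· == d) := by
  unfold PySem.Chars.splitOn
  rw [splitOn_go_singleton d _ _ _ _ (by omega)]
  cases s.splitOnP (· == d) with
  | nil => rfl
  | cons a t => simp

-- character-level picture of A's helper
lemma base_toList (s : String) :
    (RemoveNamespaceBase s).toList = specC s.toList := by
  unfold RemoveNamespaceBase
  by_cases hf : PySem.Str.find s ":" = -1
  · rw [if_pos hf]
    rw [PySem.Str.find_eq] at hf
    have hnin : ':' ∉ s.toList := by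
      intro hm
      exact (PySem.Chars.find_eq_neg_one_iff _ _).mp (by simpa using hf)
        ((List.singleton_infix_iff _ _).mpr (by simpa using hm))
    rw [specC_no_colon _ hnin]
  · rw [if_neg hf]
    have hsplit : (PySem.Str.split? s ":").getD []
        = (List.splitOnP (· == ':') s.toList).map String.ofList := by
      simp [PySem.Str.split?, PySem.Chars.split?,
        show (":" : String).toList = [':'] from rfl, splitOn_singleton]
    rw [hsplit]
    show (PySem.List.pyGetD (List.map String.ofList (List.splitOnP (· == ':') s.toList))
        ((((List.splitOnP (· == ':') s.toList).map String.ofList).length : Int) - 1)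
        "").toList = specC s.toList
    have hne : List.splitOnP (· == ':') s.toList ≠ [] := List.splitOnP_ne_nil _ _
    have hpos : 0 < (List.splitOnP (· == ':') s.toList).length :=
      List.length_pos_of_ne_nil hne
    have hcast : (((List.splitOnP (· == ':') s.toList).map String.ofList).length : Int) - 1
        = (((List.splitOnP (· == ':') s.toList).length - 1 : Nat) : Int) := by
      simp only [List.length_map]; omega
    rw [hcast, show ("" : String) = String.ofList [] from rfl,
      PySem.List.pyGetD_natCast, List.getD_map, String.toList_ofList]
    exact getD_length_sub_one _ [] hne

lemma foldB (cs : List Char) :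
    ∀ (res cur : List Char),
      (cs.foldl (fun (st : List Char × List Char) ch =>
          if ch = ':' then (st.1, [])
          else if ch = '|' then (st.1 ++ st.2 ++ ['|'], [])
          else (st.1, st.2 ++ [ch])) (res, cur)).1
        ++ (cs.foldl (fun (st : List Char × List Char) ch =>
          if ch = ':' then (st.1, [])
          else if ch = '|' then (st.1 ++ st.2 ++ ['|'], [])
          else (st.1, st.2 ++ [ch])) (res, cur)).2
      = res ++ gB cs cur := by
  induction cs with
  | nil => intro res cur; simp [gB]
  | cons c cs ih =>
    intro res cur
    by_cases h1 : c = ':'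
    · simpa [List.foldl_cons, h1, gB] using ih res []
    · by_cases h2 : c = '|'
      · simpa [List.foldl_cons, h1, h2, gB] using ih (res ++ cur ++ ['|']) []
      · simpa [List.foldl_cons, h1, h2, gB] using ih res (cur ++ [c])

lemma gB_eq (cs : List Char) :
    ∀ (cur : List Char), ':' ∉ cur →
      gB cs cur = joinPipe (((cs.splitOnP (· == '|')).modifyHead (cur ++ ·)).map specC) := by
  induction cs with
  | nil =>
    intro cur h
    simp [gB, List.splitOnP_nil, joinPipe, specC_no_colon _ h]
  | cons c cs ih =>
    intro cur h
    by_cases h1 : c = ':'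
    · subst h1
      rw [List.splitOnP_cons]
      simp only [beq_iff_eq]
      rw [gB, if_pos rfl, ih [] (by simp)]
      rcases hL : List.splitOnP (fun x => x == '|') cs with _ | ⟨a, t⟩
      · exact absurd hL (List.splitOnP_ne_nil _ _)
      · simp [specC_append_colon]
    · by_cases h2 : c = '|'
      · subst h2
        rw [List.splitOnP_cons]
        simp only [beq_self_eq_true, if_pos]
        rw [gB, if_neg (by decide), if_pos rfl, ih [] (by simp)]
        rcases hL : List.splitOnP (fun x => x == '|') cs with _ | ⟨a, t⟩
        · exact absurd hL (List.splitOnP_ne_nil _ _)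
        · simp [joinPipe, specC_no_colon _ h]
      · rw [List.splitOnP_cons]
        simp only [beq_iff_eq, h2, if_false, List.modifyHead_modifyHead]
        rw [gB, if_neg h1, if_neg h2,
          ih (cur ++ [c]) (by simp [h]; intro hc; exact h1 hc.symm)]
        rcases hL : List.splitOnP (fun x => x == '|') cs with _ | ⟨a, t⟩
        · exact absurd hL (List.splitOnP_ne_nil _ _)
        · simp

-- B's value
lemma alt_toList (s : String) :
    (RemoveNamespace_alt s).toList = joinPipe ((s.toList.splitOnP (· == '|')).map specC) := by
  unfold RemoveNamespace_alt
  rw [String.toList_ofList, foldB, gB_eq _ [] (by simp), List.nil_append]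
  rcases hL : List.splitOnP (fun x => x == '|') s.toList with _ | ⟨a, t⟩
  · exact absurd hL (List.splitOnP_ne_nil _ _)
  · simp

lemma getD_length_sub_one' {α : Type} (l : List α) (x : α) (d : α) :
    (l ++ [x]).getD l.length d = x := by
  rw [List.getD_eq_getElem _ _ (by simp)]
  exact List.getElem_concat_length rfl _

lemma map_getD_range {α : Type} (l : List α) (d : α) :
    (List.range l.length).map (fun k => l.getD k d) = l := by
  apply List.ext_getElem
  · simp
  · intro i h1 h2
    simp only [List.getElem_map, List.getElem_range]
    exact List.getD_eq_getElem _ _ h2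

lemma joinPipe_concat (ys : List (List Char)) (y : List Char) :
    joinPipe (ys ++ [y]) = (ys.map (fun a => a ++ ['|'])).flatten ++ y := by
  induction ys with
  | nil => simp [joinPipe]
  | cons a ys ih =>
    cases hys : ys ++ [y] with
    | nil => simp at hys
    | cons b t =>
      rw [List.cons_append, hys]
      show a ++ ['|'] ++ joinPipe (b :: t) = _
      rw [← hys, ih]
      simp

-- A's join loop over indices, after casting to Nat indices
lemma loopA (L : List (List Char)) (hne : L ≠ []) :
    (List.range L.length).foldl (fun acc (k : Nat) =>
      if (k : Int) = (L.length : Int) - 1 then acc ++ specC (L.getD k [])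
      else acc ++ specC (L.getD k []) ++ ['|']) [] = joinPipe (L.map specC) := by
  obtain ⟨xs, x, rfl⟩ : ∃ xs x, L = xs ++ [x] := by
    rcases List.eq_nil_or_concat L with h | ⟨xs, x, h⟩
    · exact absurd h hne
    · exact ⟨xs, x, by simpa [List.concat_eq_append] using h⟩
  have hlen : (xs ++ [x]).length = xs.length + 1 := by simp
  rw [hlen, List.range_succ, List.foldl_append]
  have hpre : (List.range xs.length).foldl (fun acc (k : Nat) =>
      if (k : Int) = ((xs.length + 1 : Nat) : Int) - 1 then acc ++ specC ((xs ++ [x]).getD k [])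
      else acc ++ specC ((xs ++ [x]).getD k []) ++ ['|']) []
      = ((xs.map fun a => specC a ++ ['|']).flatten) := by
    rw [PySem.List.foldl_congr_mem _ _
      (fun acc k => acc ++ (specC (xs.getD k []) ++ ['|'])) _ ?_]
    · rw [PySem.List.foldl_append_eq_flatMap, List.flatMap_def]
      have hmr : (List.range xs.length).map (fun k => specC (xs.getD k []) ++ ['|'])
          = xs.map (fun a => specC a ++ ['|']) := by
        conv_rhs => rw [← map_getD_range xs ([] : List Char)]
        rw [List.map_map]
        rfl
      rw [hmr]
      rfl
    · intro acc k hk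
      have hk' : k < xs.length := List.mem_range.mp hk
      rw [if_neg (by push_cast; omega), List.getD_append _ _ _ _ hk']
      simp [List.append_assoc]
  rw [hpre, List.foldl_cons, List.foldl_nil, if_pos (by push_cast; ring),
    getD_length_sub_one', List.map_append,
    show List.map specC [x] = [specC x] from rfl, joinPipe_concat, List.map_map]
  rfl

-- A's value
lemma a_toList (s : String) :
    (RemoveNamespace s).toList = joinPipe ((s.toList.splitOnP (· == '|')).map specC) := by
  unfold RemoveNamespace
  by_cases hf : PySem.Str.find s "|" = -1
  · rw [if_pos hf, base_toList]
    rw [PySem.Str.find_eq] at hf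
    have hnin : '|' ∉ s.toList := fun hm =>
      (PySem.Chars.find_eq_neg_one_iff _ _).mp (by simpa using hf)
        ((List.singleton_infix_iff _ _).mpr hm)
    rw [List.splitOnP_eq_single _ _ ?_]
    · rfl
    · intro x hx hpx
      exact hnin ((beq_iff_eq.mp hpx) ▸ hx)
  · rw [if_neg hf]
    have hsplit : (PySem.Str.split? s "|").getD []
        = (List.splitOnP (· == '|') s.toList).map String.ofList := by
      simp [PySem.Str.split?, PySem.Chars.split?,
        show ("|" : String).toList = ['|'] from rfl, splitOn_singleton]
    rw [hsplit]
    have hget : ∀ k : Nat,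
        (PySem.List.pyGetD ((List.splitOnP (· == '|') s.toList).map String.ofList)
          (k : Int) "").toList = (List.splitOnP (· == '|') s.toList).getD k [] := by
      intro k
      rw [show ("" : String) = String.ofList [] from rfl, PySem.List.pyGetD_natCast,
        List.getD_map, String.toList_ofList]
    have hlen : (((List.splitOnP (· == '|') s.toList).map String.ofList).length : Int)
        = ((List.splitOnP (· == '|') s.toList).length : Int) := by simp
    simp only [hlen]
    rw [PySem.List.pyRange_zero_natCast, List.foldl_map]
    have hhom := List.foldl_hom (f := String.toList)
      (g₁ := fun resultName (p : Nat) =>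
        let fixName := RemoveNamespaceBase
          (PySem.List.pyGetD ((List.splitOnP (· == '|') s.toList).map String.ofList)
            ((p : Nat) : Int) "")
        let resultName := resultName ++ fixName
        if ((p : Nat) : Int) = ((List.splitOnP (· == '|') s.toList).length : Int) - 1
        then resultName else resultName ++ "|")
      (g₂ := fun acc (k : Nat) =>
        if (k : Int) = ((List.splitOnP (· == '|') s.toList).length : Int) - 1
        then acc ++ specC ((List.splitOnP (· == '|') s.toList).getD k [])
        else acc ++ specC ((List.splitOnP (· == '|') s.toList).getD k []) ++ ['|'])
      (l := List.range (List.splitOnP (· == '|') s.toList).length)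
      (init := "")
      (by
        intro x k
        simp only [apply_ite String.toList, String.toList_append, base_toList, hget k]
        by_cases hk : ((k : Nat) : Int)
            = ((List.splitOnP (· == '|') s.toList).length : Int) - 1
        · rw [if_pos hk, if_pos hk]
        · rw [if_neg hk, if_neg hk]
          rfl)
    rw [← hhom]
    exact loopA _ (List.splitOnP_ne_nil _ _)

-- ===== VERDICT (by name: the statement is the Claim_ definition above) =====
theorem RemoveNamespace_spec : Claim_equal_RemoveNamespace := by
  intro name _
  unfold Spec_RemoveNamespace
  exact String.toList_inj.mp ((a_toList name).trans (alt_toList name).symm)
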